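-- pv_equiv track=rewrite | github.com/Bigdreamer17/LeetCode | 0670-maximum-swap/0670-maximum-swap.py | maximumSwap
-- ===== SOURCE A (Python) =====
-- def maximumSwap(num: int) -> int:
--     num = [int(x) for x in str(num)]
--     max_ = len(num) - 1
--     l = r = 0
--
--     for i in range(len(num)- 1, -1, -1):
--         if num[i] > num[max_]:
--             max_ = i
--         elif num[i] < num[max_]:
--             l = i
--             r = max_
--     num[l], num[r] = num[r], num[l]
--     return int(''.join([str(x) for x in num]))
-- ===== SOURCE B (Python) =====
-- def maximumSwap(num: int) -> int:
--     digits = [int(c) for c in str(num)]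
--     last = {d: i for i, d in enumerate(digits)}
--     pair = _find_swap(digits, last)
--     if pair is not None:
--         i, j = pair
--         digits[i], digits[j] = digits[j], digits[i]
--     return int(''.join(str(d) for d in digits))
--
--
-- def _find_swap(digits, last):
--     # first position that can be improved, swapped with the last
--     # occurrence of the largest digit available to its right
--     for i, d in enumerate(digits):
--         for b in range(9, d, -1):
--             j = last.get(b, -1)
--             if j > i:
--                 return i, j
--     return None
-- ===== Notes on version B (the rewrite author's own statement) =====
-- stated objective: alternative
-- what changed: Replaces A's single backward pass that threads a (rightmost-max, l, r) state triple with a precomputed last-occurrence table for each digit 0-9 plus a forward scan that, at the first improvable position, swaps in the last occurrence of the largest larger digit; Pre_ excludes negative num, on which A (and B) raise ValueError via int('-').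
import Mathlib
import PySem

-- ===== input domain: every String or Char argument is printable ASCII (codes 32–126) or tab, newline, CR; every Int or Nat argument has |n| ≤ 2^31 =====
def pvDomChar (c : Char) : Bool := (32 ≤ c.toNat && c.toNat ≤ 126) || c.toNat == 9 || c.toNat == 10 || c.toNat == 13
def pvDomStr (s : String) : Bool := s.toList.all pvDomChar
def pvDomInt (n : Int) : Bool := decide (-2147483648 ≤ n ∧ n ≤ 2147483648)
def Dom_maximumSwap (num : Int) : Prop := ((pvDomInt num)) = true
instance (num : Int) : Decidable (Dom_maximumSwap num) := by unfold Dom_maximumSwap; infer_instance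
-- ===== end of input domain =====

-- B replaces A's backward max-tracking pass by a last-occurrence table per digit plus a
-- forward scan for the first improvable position (objective: alternative, same cost).
-- Both Pythons raise ValueError on negative num (int('-')); Pre_ excludes exactly those.

-- ===== PORT A =====
-- num = [int(x) for x in str(num)]  (int of a one-char string; getD 0 is unreachable under
-- Pre_, where every character of str(num) is a decimal digit and ofChars? returns some)
def pvDigits (num : Int) : List Int :=
  (PySem.Int.toChars num).map (fun c => (PySem.Int.ofChars? [c]).getD 0)

-- the loop body: state (max_, l, r), one step for index i
def pvStepA (ds : List Int) (s : Int × Int × Int) (i : Int) : Int × Int × Int :=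
  if PySem.List.pyGetD ds i 0 > PySem.List.pyGetD ds s.1 0 then (i, s.2.1, s.2.2)
  else if PySem.List.pyGetD ds i 0 < PySem.List.pyGetD ds s.1 0 then (s.1, i, s.1)
  else s

-- int(''.join([str(x) for x in num]))  (getD 0 unreachable: the joined digit string is a
-- nonempty decimal numeral under Pre_)
def pvFromDigits (ds : List Int) : Int :=
  (PySem.Int.ofChars? (PySem.Chars.join [] (ds.map (fun d => PySem.Int.toChars d)))).getD 0

def maximumSwap (num : Int) : Int :=
  let ds := pvDigits num
  let n : Int := ds.length
  let st := (PySem.List.pyRange (n - 1) (-1) (-1)).foldl (pvStepA ds) (n - 1, 0, 0)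
  let l := st.2.1
  let r := st.2.2
  let dl := PySem.List.pyGetD ds l 0
  let dr := PySem.List.pyGetD ds r 0
  pvFromDigits (PySem.List.pySetD (PySem.List.pySetD ds l dr) r dl)

-- ===== PORT B =====
-- helper _find_swap(digits, last): first i whose digit can be improved, paired with the
-- last occurrence of the largest larger digit
def pvFindSwap : List (Int × Int) → PySem.Dict Int Int → Option (Int × Int)
  | [], _ => none
  | (i, d) :: rest, last =>
      match (PySem.List.pyRange 9 d (-1)).find?
          (fun b => decide (PySem.Dict.getD last b (-1) > i)) with
      | some b => some (i, PySem.Dict.getD last b (-1))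
      | none => pvFindSwap rest last

def maximumSwap_alt (num : Int) : Int :=
  let ds := pvDigits num
  let last := (PySem.List.enumerate ds).foldl
      (fun (d : PySem.Dict Int Int) p => d.insert p.2 p.1) PySem.Dict.empty
  let ds2 := match pvFindSwap (PySem.List.enumerate ds) last with
    | some (i, j) =>
        let di := PySem.List.pyGetD ds i 0
        let dj := PySem.List.pyGetD ds j 0
        PySem.List.pySetD (PySem.List.pySetD ds i dj) j di
    | none => ds
  pvFromDigits ds2

-- ===== PRECONDITION & SPEC =====
-- Both A and B raise ValueError on num < 0 (int('-') on the sign character); Pre_ excludes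
-- exactly those inputs.
def Pre_maximumSwap (num : Int) : Prop := 0 ≤ num
instance (num : Int) : Decidable (Pre_maximumSwap num) := by unfold Pre_maximumSwap; infer_instance
def pvWitness_maximumSwap : Int := (2736)

def Spec_maximumSwap (num : Int) (out : Int) : Prop := out = maximumSwap_alt num
instance (num : Int) (out : Int) : Decidable (Spec_maximumSwap num out) := by unfold Spec_maximumSwap; infer_instance

-- ===== CLAIM (what is proved, stated in full; the proofs are below) =====
def Claim_equal_maximumSwap : Prop := ∀ (num : Int), Dom_maximumSwap num → Pre_maximumSwap num → Spec_maximumSwap num (maximumSwap num)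

-- ===== LEMMAS AND PROOFS =====

-- left-to-right summary of a digit list: rightmost argmax (.1) and, if any,
-- (first improvable index, rightmost argmax of its strict suffix) (.2)
def pvSummary : List Int → Nat × Option (Nat × Nat)
  | [] => (0, none)
  | [_] => (0, none)
  | d :: e :: rest =>
      let p := pvSummary (e :: rest)
      let mv := (e :: rest).getD p.1 0
      if mv < d then (0, Option.map (fun q => (q.1 + 1, q.2 + 1)) p.2)
      else if d < mv then (p.1 + 1, some (0, p.1 + 1))
      else (p.1 + 1, Option.map (fun q => (q.1 + 1, q.2 + 1)) p.2)

-- index of the last occurrence of x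
def pvLastIdx (x : Int) : List Int → Option Nat
  | [] => none
  | d :: rest =>
      match pvLastIdx x rest with
      | some k => some (k + 1)
      | none => if d = x then some 0 else none

-- the (l, r) pair of A's state, in absolute indices
def pvAbsSwap (a : Nat) (o : Option (Nat × Nat)) : Int × Int :=
  match o with
  | some q => (((a + q.1 : Nat) : Int), ((a + q.2 : Nat) : Int))
  | none => (0, 0)

-- A's fold state, in absolute indices, read off the summary of the suffix ds.drop a
def pvAbsState (ds : List Int) (a : Nat) (s : Nat × Option (Nat × Nat)) : Int × Int × Int :=
  (if ds.length ≤ a then (ds.length : Int) - 1 else ((a + s.1 : Nat) : Int),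
   pvAbsSwap a s.2)

lemma pvAbsSwap_shift (a : Nat) (o : Option (Nat × Nat)) :
    pvAbsSwap a (Option.map (fun q => (q.1 + 1, q.2 + 1)) o) = pvAbsSwap (a + 1) o := by
  rcases o with _ | ⟨l, r⟩
  · rfl
  · simp only [Option.map_some, pvAbsSwap, Prod.mk.injEq]
    exact ⟨by omega, by omega⟩

lemma pvGetD_drop (l : List Int) (i j : Nat) (d : Int) :
    (l.drop i).getD j d = l.getD (i + j) d := by
  simp [List.getD_eq_getElem?_getD, List.getElem?_drop]

lemma pvSummary_cons2 (d e : Int) (rest : List Int) :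
    pvSummary (d :: e :: rest) =
      (if (e :: rest).getD (pvSummary (e :: rest)).1 0 < d then
        (0, Option.map (fun q => (q.1 + 1, q.2 + 1)) (pvSummary (e :: rest)).2)
      else if d < (e :: rest).getD (pvSummary (e :: rest)).1 0 then
        ((pvSummary (e :: rest)).1 + 1, some (0, (pvSummary (e :: rest)).1 + 1))
      else ((pvSummary (e :: rest)).1 + 1,
        Option.map (fun q => (q.1 + 1, q.2 + 1)) (pvSummary (e :: rest)).2)) := rfl

lemma pvSummary_max : ∀ (ds : List Int), ds ≠ [] →
    (pvSummary ds).1 < ds.length ∧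
    (∀ k, k < ds.length → ds.getD k 0 ≤ ds.getD (pvSummary ds).1 0) ∧
    (∀ k, (pvSummary ds).1 < k → k < ds.length → ds.getD k 0 < ds.getD (pvSummary ds).1 0) := by
  intro ds
  induction ds with
  | nil => intro h; exact absurd rfl h
  | cons d rest ih =>
      intro _
      match rest with
      | [] =>
          refine ⟨by simp [pvSummary], ?_, ?_⟩
          · intro k hk
            match k with
            | 0 => simp [pvSummary]
            | k + 1 => simp at hk
          · intro k hk1 hk2
            simp [pvSummary] at hk1 hk2
            omega
      | e :: rest' =>
          obtain ⟨ih1, ih2, ih3⟩ := ih (by simp)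
          rw [pvSummary_cons2]
          by_cases h1 : (e :: rest').getD (pvSummary (e :: rest')).1 0 < d
          · rw [if_pos h1]
            refine ⟨by simp, ?_, ?_⟩
            · intro k hk
              match k with
              | 0 => simp
              | k + 1 =>
                  have := ih2 k (by simpa using hk)
                  simp only [List.getD_cons_succ, List.getD_cons_zero]
                  omega
            · intro k hk1 hk2
              match k with
              | 0 => simp at hk1
              | k + 1 =>
                  have := ih2 k (by simpa using hk2)
                  simp only [List.getD_cons_succ, List.getD_cons_zero]
                  omega
          · rw [if_neg h1]
            have hbr : (if d < (e :: rest').getD (pvSummary (e :: rest')).1 0 then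
                ((pvSummary (e :: rest')).1 + 1, some (0, (pvSummary (e :: rest')).1 + 1))
              else ((pvSummary (e :: rest')).1 + 1,
                Option.map (fun q => (q.1 + 1, q.2 + 1)) (pvSummary (e :: rest')).2)).1
                = (pvSummary (e :: rest')).1 + 1 := by
              split <;> rfl
            rw [hbr]
            simp only [List.getD_cons_succ]
            refine ⟨by simp only [List.length_cons] at ih1 ⊢; omega, ?_, ?_⟩
            · intro k hk
              match k with
              | 0 => simp only [List.getD_cons_zero]; omega
              | k + 1 =>
                  simp only [List.getD_cons_succ]
                  exact ih2 k (by simpa using hk)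
            · intro k hk1 hk2
              match k with
              | 0 => omega
              | k + 1 =>
                  simp only [List.getD_cons_succ]
                  exact ih3 k (by omega) (by simpa using hk2)

lemma pvStepA_abs (ds : List Int) (a : Nat) (ha : a < ds.length) :
    pvStepA ds (pvAbsState ds (a + 1) (pvSummary (ds.drop (a + 1)))) (a : Int)
      = pvAbsState ds a (pvSummary (ds.drop a)) := by
  have hlt : ¬ ds.length ≤ a := by omega
  have hdrop : ds.drop a = ds[a] :: ds.drop (a + 1) := List.drop_eq_getElem_cons ha
  have hda : ds.getD a 0 = ds[a] := by
    simp [List.getD_eq_getElem?_getD, List.getElem?_eq_getElem ha]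
  by_cases hend : ds.length ≤ a + 1
  · -- a is the last index: the step compares ds[a] with itself and leaves the state unchanged
    have ha1 : ds.length = a + 1 := by omega
    have hnil : ds.drop (a + 1) = [] := by
      rw [List.drop_eq_nil_iff]; omega
    have hone : ds.drop a = [ds[a]] := by rw [hdrop, hnil]
    have hcast : ((ds.length : Int) - 1) = (a : Int) := by rw [ha1]; push_cast; ring
    rw [hnil, hone]
    simp only [pvAbsState, pvStepA, if_pos hend, if_neg hlt, pvSummary, pvAbsSwap, hcast]
    simp
  · -- the suffix after a is nonempty
    have hne : ds.drop (a + 1) ≠ [] := by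
      intro h
      rw [List.drop_eq_nil_iff] at h
      omega
    obtain ⟨e, rest', hrest⟩ := List.exists_cons_of_ne_nil hne
    have hmv : ds.getD (a + 1 + (pvSummary (e :: rest')).1) 0
        = (e :: rest').getD (pvSummary (e :: rest')).1 0 := by
      rw [← hrest]
      exact (pvGetD_drop ds (a + 1) _ 0).symm
    have hstep : pvAbsState ds (a + 1) (pvSummary (ds.drop (a + 1)))
        = (((a + 1 + (pvSummary (e :: rest')).1 : Nat) : Int),
           pvAbsSwap (a + 1) (pvSummary (e :: rest')).2) := by
      simp only [pvAbsState, if_neg hend, hrest]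
    have hRHS : pvSummary (ds.drop a) = pvSummary (ds[a] :: e :: rest') := by
      rw [hdrop, hrest]
    rw [hstep, hRHS, pvSummary_cons2]
    have e1 : PySem.List.pyGetD ds ((a : Nat) : Int) 0 = ds[a] := by
      rw [PySem.List.pyGetD_natCast, hda]
    have e2 : PySem.List.pyGetD ds (((a + 1 + (pvSummary (e :: rest')).1 : Nat) : Int)) 0
        = (e :: rest').getD (pvSummary (e :: rest')).1 0 := by
      rw [PySem.List.pyGetD_natCast, hmv]
    rcases lt_trichotomy ((e :: rest').getD (pvSummary (e :: rest')).1 0) ds[a]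
      with h1 | h1 | h1
    · rw [if_pos h1]
      simp only [pvStepA, e1, e2]
      rw [if_pos h1]
      simp only [pvAbsState, if_neg hlt, pvAbsSwap_shift]
      norm_num
    · rw [if_neg (by omega), if_neg (by omega)]
      simp only [pvStepA, e1, e2]
      rw [if_neg (by omega), if_neg (by omega)]
      simp only [pvAbsState, if_neg hlt, pvAbsSwap_shift, Prod.mk.injEq]
      exact ⟨by omega, trivial⟩
    · rw [if_neg (by omega), if_pos h1]
      simp only [pvStepA, e1, e2]
      rw [if_neg (by omega), if_pos h1]
      simp only [pvAbsState, if_neg hlt, pvAbsSwap, Prod.mk.injEq]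
      refine ⟨by omega, by omega, by omega⟩

lemma pvFoldA (ds : List Int) : ∀ (k a : Nat), a + k = ds.length →
    List.foldr (fun i s => pvStepA ds s i) ((ds.length : Int) - 1, 0, 0)
        (PySem.List.pyRange a ds.length 1)
      = pvAbsState ds a (pvSummary (ds.drop a)) := by
  intro k
  induction k with
  | zero =>
      intro a hlen
      have hnil : PySem.List.pyRange a ds.length 1 = [] :=
        PySem.List.pyRange_one_eq_nil (by omega)
      have hdnil : ds.drop a = [] := by rw [List.drop_eq_nil_iff]; omega
      rw [hnil, hdnil]
      simp only [List.foldr_nil, pvSummary, pvAbsState, if_pos (by omega : ds.length ≤ a)]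
      rfl
  | succ k ih =>
      intro a hlen
      have hcons : PySem.List.pyRange a ds.length 1
          = (a : Int) :: PySem.List.pyRange ((a + 1 : Nat) : Int) ds.length 1 := by
        rw [PySem.List.pyRange_one_cons (by omega : (a : Int) < ds.length)]
        norm_num
      rw [hcons, List.foldr_cons, ih (a + 1) (by omega)]
      exact pvStepA_abs ds a (by omega)

lemma pvDict_getD (x : Int) : ∀ (ds : List Int) (s : Int) (init : PySem.Dict Int Int),
    PySem.Dict.getD ((PySem.List.enumerate ds s).foldl
        (fun (d : PySem.Dict Int Int) p => d.insert p.2 p.1) init) x (-1)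
      = match pvLastIdx x ds with
        | some k => s + k
        | none => PySem.Dict.getD init x (-1) := by
  intro ds
  induction ds with
  | nil => intro s init; simp [PySem.List.enumerate_nil, pvLastIdx]
  | cons d rest ih =>
      intro s init
      rw [PySem.List.enumerate_cons]
      simp only [List.foldl_cons]
      rw [ih (s + 1) (init.insert d s)]
      rcases hr : pvLastIdx x rest with _ | k
      · by_cases hd : d = x
        · simp [pvLastIdx, hr, hd]
        · simp [pvLastIdx, hr, hd, PySem.Dict.getD_insert, Ne.symm hd]
      · simp [pvLastIdx, hr]
        ring

lemma pvLastIdx_eq_none : ∀ (ds : List Int) (x : Int),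
    (∀ j, j < ds.length → ds.getD j 0 ≠ x) → pvLastIdx x ds = none := by
  intro ds x h
  induction ds with
  | nil => rfl
  | cons d rest ih =>
      have hrest : pvLastIdx x rest = none := by
        apply ih
        intro j hj
        have := h (j + 1) (by simpa using Nat.succ_lt_succ hj)
        simpa using this
      have hd : d ≠ x := by simpa using h 0 (by simp)
      simp [pvLastIdx, hrest, hd]

lemma pvLastIdx_eq_some : ∀ (ds : List Int) (x : Int) (k : Nat), k < ds.length →
    ds.getD k 0 = x → (∀ j, k < j → j < ds.length → ds.getD j 0 ≠ x) →
    pvLastIdx x ds = some k := by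
  intro ds
  induction ds with
  | nil => intro x k hk; simp at hk
  | cons d rest ih =>
      intro x k hk hval hafter
      match k with
      | 0 =>
          have hrest : pvLastIdx x rest = none := by
            apply pvLastIdx_eq_none
            intro j hj
            have := hafter (j + 1) (Nat.succ_pos j) (by simpa using Nat.succ_lt_succ hj)
            simpa using this
          have hd : d = x := by simpa using hval
          simp [pvLastIdx, hrest, hd]
      | k' + 1 =>
          have hrest : pvLastIdx x rest = some k' := by
            apply ih
            · simpa using hk
            · simpa using hval
            · intro j hj hjlen
              have := hafter (j + 1) (Nat.succ_lt_succ hj) (by simpa using Nat.succ_lt_succ hjlen)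
              simpa using this
          simp [pvLastIdx, hrest]

lemma pvLastIdx_some_spec : ∀ (ds : List Int) (x : Int) (k : Nat),
    pvLastIdx x ds = some k → k < ds.length ∧ ds.getD k 0 = x := by
  intro ds
  induction ds with
  | nil => intro x k h; simp [pvLastIdx] at h
  | cons d rest ih =>
      intro x k h
      rcases hr : pvLastIdx x rest with _ | k'
      · by_cases hd : d = x
        · simp [pvLastIdx, hr, hd] at h
          subst h
          simpa using hd
        · simp [pvLastIdx, hr, hd] at h
      · simp [pvLastIdx, hr] at h
        obtain ⟨h1, h2⟩ := ih x k' hr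
        subst h
        exact ⟨by simpa using Nat.succ_lt_succ h1, by simpa using h2⟩

lemma pvFindDesc (p : Int → Bool) (b : Int) : ∀ (L : List Int), L.Pairwise (· > ·) →
    b ∈ L → p b = true → (∀ c ∈ L, b < c → p c = false) → L.find? p = some b := by
  intro L
  induction L with
  | nil => intro _ hb; simp at hb
  | cons h t ih =>
      intro hpair hb hpb hmax
      rcases List.mem_cons.mp hb with rfl | hbt
      · exact List.find?_cons_of_pos hpb
      · have hgt : b < h := (List.pairwise_cons.mp hpair).1 b hbt
        have hph : p h = false := hmax h (List.mem_cons_self) hgt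
        rw [List.find?_cons_of_neg (by simp [hph])]
        exact ih (List.pairwise_cons.mp hpair).2 hbt hpb
          (fun c hc hbc => hmax c (List.mem_cons_of_mem _ hc) hbc)

lemma pvFindSwap_eq (ds : List Int) (hb : ∀ x ∈ ds, 0 ≤ x ∧ x ≤ 9) :
    ∀ (k a : Nat), a + k = ds.length →
    pvFindSwap (PySem.List.enumerate (ds.drop a) a)
        ((PySem.List.enumerate ds 0).foldl
          (fun (d : PySem.Dict Int Int) p => d.insert p.2 p.1) PySem.Dict.empty)
      = Option.map (fun q => (((a + q.1 : Nat) : Int), ((a + q.2 : Nat) : Int)))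
          (pvSummary (ds.drop a)).2 := by
  have hD : ∀ b : Int,
      PySem.Dict.getD ((PySem.List.enumerate ds 0).foldl
          (fun (d : PySem.Dict Int Int) p => d.insert p.2 p.1) PySem.Dict.empty) b (-1)
        = match pvLastIdx b ds with
          | some k => (k : Int)
          | none => -1 := by
    intro b
    rw [pvDict_getD]
    rcases h : pvLastIdx b ds with _ | k
    · simp [PySem.Dict.getD, PySem.Dict.get?_empty]
    · simp
  have hOcc : ∀ (c : Int) (a : Nat),
      PySem.Dict.getD ((PySem.List.enumerate ds 0).foldl
          (fun (d : PySem.Dict Int Int) p => d.insert p.2 p.1) PySem.Dict.empty) c (-1) > (a : Int) →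
      ∃ j : Nat, a < j ∧ j < ds.length ∧ ds.getD j 0 = c := by
    intro c a hgt
    rw [hD] at hgt
    rcases h : pvLastIdx c ds with _ | k
    · rw [h] at hgt; simp at hgt; omega
    · rw [h] at hgt
      simp only [] at hgt
      obtain ⟨h1, h2⟩ := pvLastIdx_some_spec ds c k h
      exact ⟨k, by exact_mod_cast hgt, h1, h2⟩
  intro k
  induction k with
  | zero =>
      intro a hlen
      have hdnil : ds.drop a = [] := by rw [List.drop_eq_nil_iff]; omega
      rw [hdnil]
      rfl
  | succ k ih =>
      intro a hlen
      have ha : a < ds.length := by omega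
      have hdrop : ds.drop a = ds[a] :: ds.drop (a + 1) := List.drop_eq_getElem_cons ha
      have hda : ds.getD a 0 = ds[a] := by
        simp [List.getD_eq_getElem?_getD, List.getElem?_eq_getElem ha]
      rw [hdrop, PySem.List.enumerate_cons]
      show (match (PySem.List.pyRange 9 ds[a] (-1)).find?
          (fun b => decide (PySem.Dict.getD _ b (-1) > (a : Int))) with
        | some b => some ((a : Int), PySem.Dict.getD _ b (-1))
        | none => pvFindSwap (PySem.List.enumerate (ds.drop (a + 1)) ((a : Int) + 1)) _) = _
      rcases hrest : ds.drop (a + 1) with _ | ⟨e, rest'⟩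
      · -- a is the last index: nothing to its right, no swap is found
        have hlast : a + 1 = ds.length := by
          have := congrArg List.length hrest
          simp at this
          omega
        have hnone : (PySem.List.pyRange 9 ds[a] (-1)).find?
            (fun b => decide (PySem.Dict.getD ((PySem.List.enumerate ds 0).foldl
              (fun (d : PySem.Dict Int Int) p => d.insert p.2 p.1) PySem.Dict.empty) b (-1) > (a : Int))) = none := by
          rw [List.find?_eq_none]
          intro c _ hc
          simp only [decide_eq_true_eq] at hc
          obtain ⟨j, hj1, hj2, -⟩ := hOcc c a hc
          omega
        rw [hnone]
        simp [pvSummary, pvFindSwap, PySem.List.enumerate_nil]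
      · -- there are digits to the right of a
        have hr' : rest'.length + 1 = ds.length - (a + 1) := by
          have := congrArg List.length hrest
          simp at this
          omega
        have ha1 : a + 1 < ds.length := by omega
        obtain ⟨hm1, hm2, hm3⟩ := pvSummary_max (e :: rest') (by simp)
        have hgd : ∀ j : Nat, j < (e :: rest').length →
            ds.getD (a + 1 + j) 0 = (e :: rest').getD j 0 := by
          intro j _
          rw [← hrest]
          exact (pvGetD_drop ds (a + 1) j 0).symm
        have hmem : ∀ j : Nat, j < (e :: rest').length →
            (0 ≤ (e :: rest').getD j 0 ∧ (e :: rest').getD j 0 ≤ 9) := by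
          intro j hj
          have h1 : a + 1 + j < ds.length := by
            simp only [List.length_cons] at hj
            omega
          rw [← hgd j hj]
          have : ds.getD (a + 1 + j) 0 ∈ ds := by
            rw [List.getD_eq_getElem?_getD, List.getElem?_eq_getElem h1]
            simp
          exact hb _ this
        rw [pvSummary_cons2]
        by_cases h2 : ds[a] < (e :: rest').getD (pvSummary (e :: rest')).1 0
        · -- position a can be improved: the scan stops here
          have hlast : pvLastIdx ((e :: rest').getD (pvSummary (e :: rest')).1 0) ds
              = some (a + 1 + (pvSummary (e :: rest')).1) := by
            apply pvLastIdx_eq_some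
            · simp only [List.length_cons] at hm1; omega
            · exact hgd _ hm1
            · intro j hj hjlen
              have hrel : (pvSummary (e :: rest')).1 < j - (a + 1) := by omega
              have hrel2 : j - (a + 1) < (e :: rest').length := by
                simp only [List.length_cons]; omega
              have := hm3 (j - (a + 1)) hrel hrel2
              rw [← hgd _ hrel2] at this
              have hj' : a + 1 + (j - (a + 1)) = j := by omega
              rw [hj'] at this
              omega
          have hfind : (PySem.List.pyRange 9 ds[a] (-1)).find?
              (fun b => decide (PySem.Dict.getD ((PySem.List.enumerate ds 0).foldl
                (fun (d : PySem.Dict Int Int) p => d.insert p.2 p.1) PySem.Dict.empty) b (-1) > (a : Int)))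
              = some ((e :: rest').getD (pvSummary (e :: rest')).1 0) := by
            apply pvFindDesc
            · rw [PySem.List.pyRange_neg_one_eq_reverse, List.pairwise_reverse]
              exact PySem.List.pairwise_lt_pyRange_one _ _
            · exact PySem.List.mem_pyRange_neg_one.mpr ⟨h2, (hmem _ hm1).2⟩
            · rw [decide_eq_true_eq, hD, hlast]
              have : (a : Int) < ((a + 1 + (pvSummary (e :: rest')).1 : Nat) : Int) := by
                exact_mod_cast Nat.lt_of_lt_of_le (Nat.lt_succ_self a) (by omega)
              exact this
            · intro c _ hcgt
              rw [decide_eq_false_iff_not, not_lt]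
              by_contra hc
              rw [not_le] at hc
              obtain ⟨j, hj1, hj2, hj3⟩ := hOcc c a (by omega)
              have hrel2 : j - (a + 1) < (e :: rest').length := by
                simp only [List.length_cons]; omega
              have := hm2 (j - (a + 1)) hrel2
              rw [← hgd _ hrel2] at this
              have hj' : a + 1 + (j - (a + 1)) = j := by omega
              rw [hj', hj3] at this
              omega
          rw [hfind]
          rw [if_neg (by omega), if_pos h2]
          simp only [Option.map_some]
          rw [hD, hlast]
          have hred : (match some (a + 1 + (pvSummary (e :: rest')).1) with
              | some k => ((k : Nat) : Int)
              | none => (-1 : Int)) = ((a + 1 + (pvSummary (e :: rest')).1 : Nat) : Int) := rfl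
          rw [hred]
          simp only [Option.some.injEq, Prod.mk.injEq]
          exact ⟨by omega, by omega⟩
        · -- position a cannot be improved: the scan moves on
          have hnone : (PySem.List.pyRange 9 ds[a] (-1)).find?
              (fun b => decide (PySem.Dict.getD ((PySem.List.enumerate ds 0).foldl
                (fun (d : PySem.Dict Int Int) p => d.insert p.2 p.1) PySem.Dict.empty) b (-1) > (a : Int)))
              = none := by
            rw [List.find?_eq_none]
            intro c hcm hc
            obtain ⟨hcl, hcu⟩ := PySem.List.mem_pyRange_neg_one.mp hcm
            simp only [decide_eq_true_eq] at hc
            obtain ⟨j, hj1, hj2, hj3⟩ := hOcc c a hc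
            have hrel2 : j - (a + 1) < (e :: rest').length := by
              simp only [List.length_cons]; omega
            have := hm2 (j - (a + 1)) hrel2
            rw [← hgd _ hrel2] at this
            have hj' : a + 1 + (j - (a + 1)) = j := by omega
            rw [hj', hj3] at this
            omega
          rw [hnone]
          have hcast : ((a : Int) + 1) = ((a + 1 : Nat) : Int) := by push_cast; ring
          rw [hcast, ← hrest, ih (a + 1) (by omega), hrest]
          have hsnd : (if (e :: rest').getD (pvSummary (e :: rest')).1 0 < ds[a] then
              ((0 : Nat), Option.map (fun q => (q.1 + 1, q.2 + 1)) (pvSummary (e :: rest')).2)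
            else if ds[a] < (e :: rest').getD (pvSummary (e :: rest')).1 0 then
              ((pvSummary (e :: rest')).1 + 1, some (0, (pvSummary (e :: rest')).1 + 1))
            else ((pvSummary (e :: rest')).1 + 1,
              Option.map (fun q => (q.1 + 1, q.2 + 1)) (pvSummary (e :: rest')).2)).2
              = Option.map (fun q => (q.1 + 1, q.2 + 1)) (pvSummary (e :: rest')).2 := by
            by_cases ha2 : (e :: rest').getD (pvSummary (e :: rest')).1 0 < ds[a]
            · rw [if_pos ha2]
            · rw [if_neg ha2, if_neg h2]
          rw [hsnd]
          rcases (pvSummary (e :: rest')).2 with _ | ⟨l, r⟩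
          · rfl
          · simp only [Option.map_some, Option.some.injEq, Prod.mk.injEq]
            exact ⟨by omega, by omega⟩

lemma pvDigitVal (c : Char) (hc : c.isDigit = true) :
    0 ≤ (PySem.Int.ofChars? [c]).getD 0 ∧ (PySem.Int.ofChars? [c]).getD 0 ≤ 9 := by
  have hb : 48 ≤ c.toNat ∧ c.toNat ≤ 57 := by
    simp only [Char.isDigit, Bool.and_eq_true, decide_eq_true_eq] at hc
    unfold Char.toNat
    exact ⟨hc.1, hc.2⟩
  have hcases : c.toNat = 48 ∨ c.toNat = 49 ∨ c.toNat = 50 ∨ c.toNat = 51 ∨ c.toNat = 52 ∨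
      c.toNat = 53 ∨ c.toNat = 54 ∨ c.toNat = 55 ∨ c.toNat = 56 ∨ c.toNat = 57 := by omega
  have key : ∀ (n : Nat), c.toNat = n →
      (0 ≤ (PySem.Int.ofChars? [Char.ofNat n]).getD 0 ∧ (PySem.Int.ofChars? [Char.ofNat n]).getD 0 ≤ 9) →
      0 ≤ (PySem.Int.ofChars? [c]).getD 0 ∧ (PySem.Int.ofChars? [c]).getD 0 ≤ 9 := by
    intro n hn h
    rwa [← hn, Char.ofNat_toNat c] at h
  rcases hcases with h | h | h | h | h | h | h | h | h | h <;>
    exact key _ h (by decide)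

lemma pvDigits_props (num : Int) (h : 0 ≤ num) :
    pvDigits num ≠ [] ∧ ∀ x ∈ pvDigits num, 0 ≤ x ∧ x ≤ 9 := by
  have htc : PySem.Int.toChars num = Nat.toDigits 10 num.toNat := by
    simp [PySem.Int.toChars, not_lt.mpr h]
  constructor
  · simp only [pvDigits, htc, ne_eq, List.map_eq_nil_iff]
    intro hnil
    have := @Nat.length_toDigits_pos 10 num.toNat
    rw [hnil] at this
    simp at this
  · intro x hx
    simp only [pvDigits, htc, List.mem_map] at hx
    obtain ⟨c, hc, rfl⟩ := hx
    exact pvDigitVal c (Nat.isDigit_of_mem_toDigits (by norm_num) (by norm_num) hc)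

-- ===== VERDICT (by name: the statement is the Claim_ definition above) =====
lemma pvSetSet_self (ds : List Int) (hne : ds ≠ []) :
    PySem.List.pySetD (PySem.List.pySetD ds 0 (PySem.List.pyGetD ds 0 0)) 0
        (PySem.List.pyGetD ds 0 0) = ds := by
  rcases ds with _ | ⟨d, t⟩
  · exact absurd rfl hne
  · simp [PySem.List.pySetD_of_nonneg _ _ (le_refl (0 : Int)), PySem.List.pyGetD_zero]

set_option maxHeartbeats 1000000 in
theorem maximumSwap_spec : Claim_equal_maximumSwap := by
  intro num _ hpre
  show maximumSwap num = maximumSwap_alt num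
  obtain ⟨hne, hb⟩ := pvDigits_props num hpre
  have hrange : PySem.List.pyRange (((pvDigits num).length : Int) - 1) (-1) (-1)
      = (PySem.List.pyRange 0 (pvDigits num).length 1).reverse := by
    have := PySem.List.pyRange_neg_one_eq_reverse (((pvDigits num).length : Int) - 1) (-1)
    norm_num at this
    exact this
  have hfold : (PySem.List.pyRange (((pvDigits num).length : Int) - 1) (-1) (-1)).foldl
        (pvStepA (pvDigits num)) (((pvDigits num).length : Int) - 1, 0, 0)
      = pvAbsState (pvDigits num) 0 (pvSummary (pvDigits num)) := by
    rw [hrange, List.foldl_reverse]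
    have := pvFoldA (pvDigits num) (pvDigits num).length 0 (by omega)
    simpa using this
  have hswap := pvFindSwap_eq (pvDigits num) hb (pvDigits num).length 0 (by omega)
  simp only [List.drop_zero, Nat.cast_zero] at hswap
  simp only [maximumSwap, maximumSwap_alt, hfold, hswap]
  rcases hs : (pvSummary (pvDigits num)).2 with _ | ⟨l, r⟩
  · simp only [Option.map_none, pvAbsState, pvAbsSwap, hs]
    rw [pvSetSet_self (pvDigits num) hne]
  · simp only [Option.map_some, pvAbsState, pvAbsSwap, hs, Nat.zero_add]
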